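-- pv_equiv track=rewrite | github.com/ribalda/everybodycodes | 2024/7/step3.py | calc_power
-- ===== SOURCE A (Python) =====
-- def calc_power(device, track, steps):
--     total = 0
--     p = 10
--     for i in range(steps):
--         op = device[i % len(device)]
--         tr = track[i % len(track)]
--         if tr == "+":
--             p += 1
--         elif tr == "-":
--             p -= 1
--         elif op == "+":
--             p += 1
--         elif op == "-":
--             p -= 1
--         elif op == "=":
--             p = p
--         p = max(0, p)
--         total += p
--
--     return total
-- ===== SOURCE B (Python) =====
-- # B simulates at most one lcm-period at a time and jumps over remaining full periods in closed form or as a repeated steady-state period (alternative algorithm; pays off only when steps >> period).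
-- def calc_power(device, track, steps):
--     if steps <= 0:
--         return 0
--     # period L = lcm(len(device), len(track))
--     a, b = len(device), len(track)
--     g = a
--     x = b
--     while x:
--         g, x = x, g % x
--     L = a * b // g
--     delta = []
--     for i in range(L):
--         tr = track[i % len(track)]
--         op = device[i % len(device)]
--         if tr == '+':
--             delta.append(1)
--         elif tr == '-':
--             delta.append(-1)
--         elif op == '+':
--             delta.append(1)
--         elif op == '-':
--             delta.append(-1)
--         else:
--             delta.append(0)
--
--     def sim(p, ds):
--         s = 0
--         for d in ds:
--             p = max(0, p + d)
--             s += p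
--         return p, s
--
--     d = sum(delta)
--     C = 0
--     c = 0
--     for x in delta:
--         c += x
--         C += c
--     q, r = divmod(steps, L)
--     p, total = 10, 0
--     while q > 0:
--         if p >= L and d >= 0:
--             # no clamping for the rest: each full period adds p_k*L + C, p_{k+1} = p_k + d
--             total += q * p * L + L * d * (q * (q - 1) // 2) + q * C
--             p += q * d
--             q = 0
--         else:
--             p2, s = sim(p, delta)
--             total += s
--             if p2 == p:
--                 # steady state: every remaining full period adds the same sum
--                 total += (q - 1) * s
--                 q = 0
--             else:
--                 p = p2
--                 q -= 1
--     _, s = sim(p, delta[:r])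
--     return total + s
-- ===== Notes on version B (the rewrite author's own statement) =====
-- stated objective: alternative
-- what changed: B replaces A's uniform step-by-step simulation by a period-based algorithm: it builds the per-step delta table for one lcm(len(device),len(track)) period, simulates at most one period at a time, and jumps over all remaining full periods at once in closed form (once the power is clamp-free: p >= period and nonnegative period drift) or as a repeated steady-state period (when the period-start power repeats), then simulates the remainder; this trades a per-step loop for per-period reasoning (it pays off only when steps is much larger than the period, which the timing family does not exercise).
import Mathlib
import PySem

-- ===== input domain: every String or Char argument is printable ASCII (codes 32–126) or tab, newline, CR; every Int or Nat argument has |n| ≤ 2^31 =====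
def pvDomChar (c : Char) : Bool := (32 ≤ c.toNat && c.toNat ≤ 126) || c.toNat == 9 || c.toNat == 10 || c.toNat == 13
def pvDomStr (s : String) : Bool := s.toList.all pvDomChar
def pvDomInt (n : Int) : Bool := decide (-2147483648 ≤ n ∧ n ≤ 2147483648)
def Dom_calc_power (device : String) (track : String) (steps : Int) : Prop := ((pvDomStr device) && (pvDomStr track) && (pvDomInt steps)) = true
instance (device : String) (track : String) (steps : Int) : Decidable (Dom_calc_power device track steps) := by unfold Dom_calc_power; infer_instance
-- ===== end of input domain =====

-- B replaces A's step-by-step simulation by a period-based algorithm (objective: alternative):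
-- it simulates at most one lcm-period at a time and jumps over the remaining full periods
-- in closed form (clamp-free linear regime) or as a repeated steady-state period.

-- ===== PORT A =====
-- s[i % len(s)]; exact whenever s ≠ "" (then the index is in range and the ' ' default is never used);
-- Pre_ excludes the case where Python would divide by len(s) = 0.
def pvCharAt (s : String) (i : Int) : Char :=
  (PySem.Str.pyGet? s (PySem.Int.mod i (PySem.Str.len s))).getD ' '

def calc_power (device : String) (track : String) (steps : Int) : Int :=
  ((PySem.List.pyRange 0 steps 1).foldl
    (fun (st : Int × Int) (i : Int) =>
      let op := pvCharAt device i
      let tr := pvCharAt track i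
      let p :=
        if tr = '+' then st.2 + 1
        else if tr = '-' then st.2 - 1
        else if op = '+' then st.2 + 1
        else if op = '-' then st.2 - 1
        else if op = '=' then st.2
        else st.2
      let p := max 0 p
      (st.1 + p, p)) (0, 10)).1

-- ===== PORT B =====
-- hand-written Euclid loop from Source B:  while x: g, x = x, g % x
def pvEuclid (g x : Nat) : Nat :=
  if h : x = 0 then g else pvEuclid x (g % x)
termination_by x
decreasing_by exact Nat.mod_lt _ (Nat.pos_of_ne_zero h)

-- the per-step power change at step i (Source B's delta-table entry)
def pvDeltaAt (device : String) (track : String) (i : Nat) : Int :=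
  let tr := track.toList.getD (i % track.toList.length) ' '
  let op := device.toList.getD (i % device.toList.length) ' '
  if tr = '+' then 1
  else if tr = '-' then -1
  else if op = '+' then 1
  else if op = '-' then -1
  else 0

-- Source B's sim(p, ds): returns (final power, sum of clamped powers)
def pvSim (p : Int) (ds : List Int) : Int × Int :=
  ds.foldl (fun (st : Int × Int) d =>
    let p' := max 0 (st.1 + d)
    (p', st.2 + p')) (p, 0)

-- Source B's main while-loop over the remaining number q of full periods
def pvLoop (delta : List Int) (L d C : Int) : Nat → Int → Int → Int × Int
  | 0, p, total => (p, total)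
  | q' + 1, p, total =>
    let q : Int := (q' : Int) + 1
    if L ≤ p ∧ 0 ≤ d then
      (p + q * d, total + q * p * L + L * d * PySem.Int.floordiv (q * (q - 1)) 2 + q * C)
    else
      let r := pvSim p delta
      if r.1 = p then (p, total + r.2 + (q - 1) * r.2)
      else pvLoop delta L d C q' r.1 (total + r.2)

def calc_power_alt (device : String) (track : String) (steps : Int) : Int :=
  if steps ≤ 0 then 0
  else
    let a := device.toList.length
    let b := track.toList.length
    let L := a * b / pvEuclid a b
    let delta := (List.range L).map (pvDeltaAt device track)
    let d := delta.sum
    let C := (delta.foldl (fun (st : Int × Int) x => (st.1 + x, st.2 + (st.1 + x))) (0, 0)).2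
    let q := PySem.Int.floordiv steps (L : Int)
    let r := PySem.Int.mod steps (L : Int)
    let res := pvLoop delta (L : Int) d C q.toNat 10 0
    res.2 + (pvSim res.1 (delta.take r.toNat)).2

-- ===== PRECONDITION & SPEC =====
-- Pre_ excludes only the inputs where A raises ZeroDivisionError: steps > 0 with an empty device or track.
def Pre_calc_power (device : String) (track : String) (steps : Int) : Prop :=
  steps ≤ 0 ∨ (device ≠ "" ∧ track ≠ "")
instance (device : String) (track : String) (steps : Int) : Decidable (Pre_calc_power device track steps) := by unfold Pre_calc_power; infer_instance

def pvWitness_calc_power : String × String × Int := ("+-x", "=+", 7)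

def Spec_calc_power (device : String) (track : String) (steps : Int) (out : Int) : Prop := out = calc_power_alt device track steps
instance (device : String) (track : String) (steps : Int) (out : Int) : Decidable (Spec_calc_power device track steps out) := by unfold Spec_calc_power; infer_instance

-- ===== CLAIM (what is proved, stated in full; the proofs are below) =====
def Claim_equal_calc_power : Prop := ∀ (device : String) (track : String) (steps : Int), Dom_calc_power device track steps → Pre_calc_power device track steps → Spec_calc_power device track steps (calc_power device track steps)


-- ===== LEMMAS AND PROOFS =====

-- the clamped run, as a function of a step-indexed delta function
def runN (d : Nat -> Int) : Nat -> Nat -> Int -> Int -> Int × Int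
  | _, 0, p, t => (p, t)
  | i, n + 1, p, t =>
    let p' := max 0 (p + d i)
    runN d (i + 1) n p' (t + p')

-- the same run, driven by a list of deltas (Source B's sim)
def runL : List Int -> Int -> Int -> Int × Int
  | [], p, t => (p, t)
  | x :: ds, p, t => runL ds (max 0 (p + x)) (t + max 0 (p + x))

def tri : Nat -> Int
  | 0 => 0
  | q + 1 => tri q + q

theorem runN_t (d : Nat -> Int) (n : Nat) : ∀ (i : Nat) (p t : Int),
    runN d i n p t = ((runN d i n p 0).1, t + (runN d i n p 0).2) := by
  induction n with
  | zero => intro i p t; simp [runN]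
  | succ n ih =>
    intro i p t
    simp only [runN]
    rw [ih (i+1) (max 0 (p + d i)) (t + max 0 (p + d i)),
        ih (i+1) (max 0 (p + d i)) (0 + max 0 (p + d i))]
    simp only [Prod.mk.injEq, true_and]
    ring

theorem runN_append (d : Nat -> Int) (m : Nat) : ∀ (n i : Nat) (p t : Int),
    runN d i (m + n) p t = runN d (i + m) n (runN d i m p t).1 (runN d i m p t).2 := by
  induction m with
  | zero => intro n i p t; simp [runN]
  | succ m ih =>
    intro n i p t
    rw [show m + 1 + n = (m + n) + 1 from by omega]
    simp only [runN]
    rw [ih n (i+1), show i + (m + 1) = (i + 1) + m from by omega]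

theorem runN_shift (d : Nat -> Int) (L : Nat) (hper : ∀ j, d (j + L) = d j) (n : Nat) :
    ∀ (i : Nat) (p t : Int), runN d (i + L) n p t = runN d i n p t := by
  induction n with
  | zero => intro i p t; simp [runN]
  | succ n ih =>
    intro i p t
    simp only [runN]
    rw [hper i, show i + L + 1 = (i + 1) + L from by omega, ih (i+1)]

theorem runN_shift_mul (d : Nat -> Int) (L : Nat) (hper : ∀ j, d (j + L) = d j)
    (k : Nat) : ∀ (n : Nat) (p t : Int), runN d (k * L) n p t = runN d 0 n p t := by
  induction k with
  | zero => intro n p t; rw [Nat.zero_mul]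
  | succ k ih =>
    intro n p t
    rw [show (k + 1) * L = k * L + L from by ring, runN_shift d L hper, ih]

theorem sum_shift (d : Nat -> Int) (i m : Nat) :
    ∑ j ∈ Finset.range (m + 1), d (i + j)
      = d i + ∑ j ∈ Finset.range m, d (i + 1 + j) := by
  rw [Finset.sum_range_succ']
  simp only [Nat.add_zero]
  rw [add_comm]
  congr 1
  apply Finset.sum_congr rfl
  intro j _
  congr 1
  omega

theorem sum_ge (d : Nat -> Int) (hbd : ∀ j, -1 ≤ d j) (i : Nat) :
    ∀ m : Nat, -(m : Int) ≤ ∑ j ∈ Finset.range m, d (i + j) := by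
  intro m
  induction m with
  | zero => simp
  | succ m ih =>
    rw [Finset.sum_range_succ]
    push_cast
    have := hbd (i + m)
    linarith

theorem runN_noclamp (d : Nat -> Int) (n : Nat) : ∀ (i : Nat) (p t : Int),
    (∀ m, m ≤ n → 0 ≤ p + ∑ j ∈ Finset.range m, d (i + j)) →
    runN d i n p t
      = (p + ∑ j ∈ Finset.range n, d (i + j),
         t + ∑ m ∈ Finset.range n, (p + ∑ j ∈ Finset.range (m + 1), d (i + j))) := by
  induction n with
  | zero => intro i p t _; simp [runN]
  | succ n ih =>
    intro i p t h
    have h1 : 0 ≤ p + d i := by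
      have := h 1 (by omega); simpa using this
    simp only [runN]
    rw [max_eq_right h1]
    rw [ih (i + 1) (p + d i) (t + (p + d i)) ?_]
    · simp only [Prod.mk.injEq]
      constructor
      · rw [sum_shift d i n]; ring
      · rw [Finset.sum_range_succ' (fun m => p + ∑ j ∈ Finset.range (m + 1), d (i + j)) n]
        simp only [Nat.zero_add, Finset.sum_range_one]
        have hs : ∀ m : Nat, ∑ j ∈ Finset.range (m + 1 + 1), d (i + j)
            = d i + ∑ j ∈ Finset.range (m + 1), d (i + 1 + j) := fun m => sum_shift d i (m + 1)
        simp only [hs]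
        simp only [Finset.sum_add_distrib]
        simp only [Finset.sum_const, Finset.card_range, nsmul_eq_mul]
        ring
    · intro m hm
      have := h (m + 1) (by omega)
      rw [sum_shift d i m] at this
      linarith

theorem runN_period (d : Nat -> Int) (L : Nat) (hbd : ∀ j, -1 ≤ d j) (p t : Int)
    (hp : (L : Int) ≤ p) :
    runN d 0 L p t
      = (p + ∑ j ∈ Finset.range L, d j,
         t + p * L + ∑ m ∈ Finset.range L, ∑ j ∈ Finset.range (m + 1), d j) := by
  rw [runN_noclamp d L 0 p t ?_]
  · simp only [Nat.zero_add, Prod.mk.injEq, true_and]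
    simp only [Finset.sum_add_distrib]
    simp only [Finset.sum_const, Finset.card_range, nsmul_eq_mul]
    ring
  · intro m hm
    have h1 := sum_ge d hbd 0 m
    have h2 : (m : Int) ≤ (L : Int) := by exact_mod_cast hm
    linarith

theorem tri_mul (q : Nat) : (q : Int) * ((q : Int) - 1) = 2 * tri q := by
  induction q with
  | zero => simp [tri]
  | succ q ih =>
    simp only [tri]
    push_cast
    linear_combination ih

theorem tri_eq (q : Nat) :
    PySem.Int.floordiv ((q : Int) * ((q : Int) - 1)) 2 = tri q := by
  rw [tri_mul, PySem.Int.floordiv_eq_ediv_of_pos (by norm_num)]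
  exact Int.mul_ediv_cancel_left _ (by norm_num)

theorem runN_periods_lin (d : Nat -> Int) (L : Nat)
    (hper : ∀ j, d (j + L) = d j) (hbd : ∀ j, -1 ≤ d j)
    (hD : 0 ≤ ∑ j ∈ Finset.range L, d j) :
    ∀ (q : Nat) (p t : Int), (L : Int) ≤ p →
    runN d 0 (q * L) p t
      = (p + q * ∑ j ∈ Finset.range L, d j,
         t + q * p * L + L * (∑ j ∈ Finset.range L, d j) * tri q
           + q * ∑ m ∈ Finset.range L, ∑ j ∈ Finset.range (m + 1), d j) := by
  intro q
  induction q with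
  | zero => intro p t _; simp [runN, tri]
  | succ q ih =>
    intro p t hp
    rw [show (q + 1) * L = L + q * L from by ring, runN_append]
    rw [runN_period d L hbd p t hp]
    rw [show (0 : Nat) + L = 1 * L from by ring, runN_shift_mul d L hper 1]
    rw [ih _ _ (by linarith)]
    simp only [tri, Prod.mk.injEq]
    refine ⟨?_, ?_⟩ <;> (push_cast; ring)

theorem runN_periods_fix (d : Nat -> Int) (L : Nat)
    (hper : ∀ j, d (j + L) = d j) (p s : Int)
    (hfix : runN d 0 L p 0 = (p, s)) :
    ∀ (q : Nat) (t : Int), runN d 0 (q * L) p t = (p, t + q * s) := by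
  intro q
  induction q with
  | zero => intro t; simp [runN]
  | succ q ih =>
    intro t
    rw [show (q + 1) * L = L + q * L from by ring, runN_append]
    rw [runN_t d L 0 p t, hfix]
    rw [show (0 : Nat) + L = 1 * L from by ring, runN_shift_mul d L hper 1]
    rw [ih]
    simp only [Prod.mk.injEq, true_and]
    push_cast
    ring

theorem pvSim_eq_runL (ds : List Int) : ∀ (p t : Int),
    ds.foldl (fun (st : Int × Int) x =>
      let p' := max 0 (st.1 + x)
      (p', st.2 + p')) (p, t) = runL ds p t := by
  induction ds with
  | nil => intro p t; rfl
  | cons x ds ih => intro p t; simp only [List.foldl, runL]; exact ih _ _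

theorem runL_range_map (d : Nat -> Int) : ∀ (n i : Nat) (p t : Int),
    runL ((List.range n).map (fun j => d (i + j))) p t = runN d i n p t := by
  intro n
  induction n with
  | zero => intro i p t; rfl
  | succ n ih =>
    intro i p t
    rw [List.range_succ_eq_map]
    simp only [List.map_cons, List.map_map, runL, Nat.add_zero]
    rw [show ((fun j => d (i + j)) ∘ Nat.succ) = (fun j => d (i + 1 + j)) from by
      funext j; simp only [Function.comp]; congr 1; omega]
    rw [ih (i + 1)]
    rfl

theorem runL_range_map0 (d : Nat -> Int) (n : Nat) (p t : Int) :
    runL ((List.range n).map d) p t = runN d 0 n p t := by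
  rw [show (List.range n).map d = (List.range n).map (fun j => d (0 + j)) from by
    apply List.map_congr_left; intro j _; congr 1; omega]
  exact runL_range_map d n 0 p t

theorem sum_list_range (d : Nat -> Int) (n : Nat) :
    ((List.range n).map d).sum = ∑ j ∈ Finset.range n, d j := by
  induction n with
  | zero => simp
  | succ n ih => rw [List.range_succ, Finset.sum_range_succ, List.map_append,
      List.sum_append, ih]; simp

theorem Cfold (n : Nat) : ∀ (d : Nat -> Int) (c0 C0 : Int),
    ((List.range n).map d).foldl
        (fun (st : Int × Int) x => (st.1 + x, st.2 + (st.1 + x))) (c0, C0)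
      = (c0 + ∑ j ∈ Finset.range n, d j,
         C0 + ∑ m ∈ Finset.range n, (c0 + ∑ j ∈ Finset.range (m + 1), d j)) := by
  induction n with
  | zero => intro d c0 C0; simp
  | succ n ih =>
    intro d c0 C0
    rw [List.range_succ_eq_map]
    simp only [List.map_cons, List.map_map, List.foldl_cons]
    rw [show (d ∘ Nat.succ) = (fun j => d (j + 1)) from by funext j; rfl]
    rw [ih (fun j => d (j + 1)) (c0 + d 0) (C0 + (c0 + d 0))]
    simp only [Prod.mk.injEq]
    have hs : ∀ m : Nat, ∑ j ∈ Finset.range (m + 1), d j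
        = d 0 + ∑ j ∈ Finset.range m, d (j + 1) := by
      intro m; rw [Finset.sum_range_succ']; ring
    constructor
    · rw [hs n]; ring
    · rw [Finset.sum_range_succ' (fun m => c0 + ∑ j ∈ Finset.range (m + 1), d j) n]
      simp only [Nat.zero_add, Finset.sum_range_one]
      have hs2 : ∀ m : Nat, (fun m => c0 + ∑ j ∈ Finset.range (m + 1), d j) (m + 1)
          = (c0 + d 0) + ∑ j ∈ Finset.range (m + 1), d (j + 1) := by
        intro m; simp only; rw [hs (m + 1)]; ring
      simp only [hs2]
      ring

theorem pvEuclid_eq : ∀ (x g : Nat), pvEuclid g x = Nat.gcd g x := by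
  intro x
  induction x using Nat.strong_induction_on with
  | _ x ih =>
    intro g
    by_cases h : x = 0
    · simp [pvEuclid, h]
    · rw [pvEuclid, dif_neg h]
      rw [ih (g % x) (Nat.mod_lt _ (Nat.pos_of_ne_zero h)) x]
      rw [Nat.gcd_comm g x, Nat.gcd_rec x g, Nat.gcd_comm (g % x) x]

theorem pvLoop_runN (d : Nat -> Int) (L : Nat)
    (hper : ∀ j, d (j + L) = d j) (hbd : ∀ j, -1 ≤ d j ∧ d j ≤ 1) :
    ∀ (q : Nat) (p t : Int),
    pvLoop ((List.range L).map d) (L : Int)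
        (∑ j ∈ Finset.range L, d j)
        (∑ m ∈ Finset.range L, ∑ j ∈ Finset.range (m + 1), d j) q p t
      = runN d 0 (q * L) p t := by
  intro q
  induction q with
  | zero => intro p t; simp [pvLoop, runN]
  | succ q ih =>
    intro p t
    rw [pvLoop]
    have hsim : pvSim p ((List.range L).map d) = runN d 0 L p 0 := by
      rw [pvSim, pvSim_eq_runL, runL_range_map0]
    by_cases hc : (L : Int) ≤ p ∧ 0 ≤ ∑ j ∈ Finset.range L, d j
    · rw [if_pos hc]
      rw [runN_periods_lin d L hper (fun j => (hbd j).1) hc.2 (q + 1) p t hc.1]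
      rw [show ((q : Int) + 1) * (((q : Int) + 1) - 1) = ((q + 1 : Nat) : Int) * (((q + 1 : Nat) : Int) - 1) from by push_cast; ring,
          tri_eq (q + 1)]
      simp only [Prod.mk.injEq]
      refine ⟨?_, ?_⟩ <;> (push_cast; ring)
    · rw [if_neg hc]
      simp only [hsim]
      by_cases hfix : (runN d 0 L p 0).1 = p
      · rw [if_pos hfix]
        have hfix' : runN d 0 L p 0 = (p, (runN d 0 L p 0).2) := by
          conv_lhs => rw [← Prod.mk.eta (p := runN d 0 L p 0)]
          rw [hfix]
        rw [runN_periods_fix d L hper p (runN d 0 L p 0).2 hfix' (q + 1) t]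
        simp only [Prod.mk.injEq, true_and]
        push_cast
        ring
      · rw [if_neg hfix]
        rw [ih (runN d 0 L p 0).1 (t + (runN d 0 L p 0).2)]
        rw [show (q + 1) * L = L + q * L from by ring, runN_append,
            runN_t d L 0 p t,
            show (0 : Nat) + L = 1 * L from by ring, runN_shift_mul d L hper 1]

theorem foldA (d : Nat -> Int) : ∀ (n i0 : Nat) (t p : Int),
    (List.range n).foldl (fun (st : Int × Int) k =>
        (st.1 + max 0 (st.2 + d (i0 + k)), max 0 (st.2 + d (i0 + k)))) (t, p)
      = ((runN d i0 n p t).2, (runN d i0 n p t).1) := by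
  intro n
  induction n with
  | zero => intro i0 t p; rfl
  | succ n ih =>
    intro i0 t p
    rw [List.range_succ_eq_map]
    simp only [List.foldl_cons, List.foldl_map, Nat.add_zero]
    rw [show (fun (st : Int × Int) (k : Nat) =>
          (st.1 + max 0 (st.2 + d (i0 + Nat.succ k)), max 0 (st.2 + d (i0 + Nat.succ k))))
        = (fun (st : Int × Int) (k : Nat) =>
          (st.1 + max 0 (st.2 + d ((i0 + 1) + k)), max 0 (st.2 + d ((i0 + 1) + k)))) from by
      funext st k
      rw [show i0 + Nat.succ k = (i0 + 1) + k from by omega]]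
    rw [ih (i0 + 1)]
    simp only [runN]

theorem toList_len_ne (s : String) (hs : s ≠ "") : s.toList.length ≠ 0 := by
  intro h
  apply hs
  have h0 : s.toList = [] := List.eq_nil_of_length_eq_zero h
  have h1 := congrArg String.ofList h0
  simpa using h1

theorem pvCharAt_eq (s : String) (hs : s.toList.length ≠ 0) (i : Int) (hi : 0 ≤ i) :
    pvCharAt s i = s.toList.getD (i.toNat % s.toList.length) ' ' := by
  unfold pvCharAt
  rw [show i = ((i.toNat : Nat) : Int) from (Int.toNat_of_nonneg hi).symm]
  have hlt : i.toNat % s.toList.length < s.toList.length :=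
    Nat.mod_lt _ (Nat.pos_of_ne_zero hs)
  simp only [PySem.Str.len_eq, PySem.Int.mod_natCast, PySem.Str.pyGet?_natCast,
    Int.toNat_natCast]
  rw [List.getElem?_eq_getElem hlt, List.getD_eq_getElem?_getD,
    List.getElem?_eq_getElem hlt]

theorem stepA_eq (device track : String) (hd : device.toList.length ≠ 0)
    (ht : track.toList.length ≠ 0) (k : Nat) (p : Int) :
    (if pvCharAt track (k : Int) = '+' then p + 1
     else if pvCharAt track (k : Int) = '-' then p - 1
     else if pvCharAt device (k : Int) = '+' then p + 1
     else if pvCharAt device (k : Int) = '-' then p - 1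
     else if pvCharAt device (k : Int) = '=' then p
     else p)
      = p + pvDeltaAt device track k := by
  rw [pvCharAt_eq device hd (k : Int) (by positivity),
      pvCharAt_eq track ht (k : Int) (by positivity)]
  simp only [pvDeltaAt, Int.toNat_natCast]
  split_ifs <;> ring

theorem foldA0 (d : Nat -> Int) (n : Nat) (t p : Int) :
    (List.range n).foldl (fun (st : Int × Int) k =>
        (st.1 + max 0 (st.2 + d k), max 0 (st.2 + d k))) (t, p)
      = ((runN d 0 n p t).2, (runN d 0 n p t).1) := by
  rw [show (fun (st : Int × Int) (k : Nat) =>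
        (st.1 + max 0 (st.2 + d k), max 0 (st.2 + d k)))
      = (fun (st : Int × Int) (k : Nat) =>
        (st.1 + max 0 (st.2 + d (0 + k)), max 0 (st.2 + d (0 + k)))) from by
    funext st k
    rw [Nat.zero_add]]
  exact foldA d n 0 t p

theorem calcA (device track : String) (hd : device.toList.length ≠ 0)
    (ht : track.toList.length ≠ 0) (steps : Int) :
    calc_power device track steps
      = (runN (pvDeltaAt device track) 0 steps.toNat 10 0).2 := by
  unfold calc_power
  rw [PySem.List.pyRange_one]
  rw [show steps - 0 = steps from by ring]
  rw [List.foldl_map]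
  simp only [zero_add, stepA_eq device track hd ht]
  rw [foldA0 (pvDeltaAt device track) steps.toNat 0 10]

theorem delta_bd (device track : String) (j : Nat) :
    -1 ≤ pvDeltaAt device track j ∧ pvDeltaAt device track j ≤ 1 := by
  simp only [pvDeltaAt]
  split_ifs <;> omega

theorem delta_per (device track : String) :
    ∀ j, pvDeltaAt device track
        (j + Nat.lcm device.toList.length track.toList.length)
      = pvDeltaAt device track j := by
  intro j
  obtain ⟨c1, hc1⟩ := Nat.dvd_lcm_left device.toList.length track.toList.length
  obtain ⟨c2, hc2⟩ := Nat.dvd_lcm_right device.toList.length track.toList.length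
  have h1 : (j + Nat.lcm device.toList.length track.toList.length) % device.toList.length
      = j % device.toList.length := by
    rw [hc1, Nat.add_mul_mod_self_left]
  have h2 : (j + Nat.lcm device.toList.length track.toList.length) % track.toList.length
      = j % track.toList.length := by
    rw [hc2, Nat.add_mul_mod_self_left]
  simp only [pvDeltaAt, h1, h2]

-- ===== VERDICT (by name: the statement is the Claim_ definition above) =====
theorem calc_power_spec : Claim_equal_calc_power := by
  unfold Claim_equal_calc_power
  intro device track steps _ hPre
  unfold Spec_calc_power
  by_cases hneg : steps ≤ 0
  · unfold calc_power calc_power_alt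
    rw [if_pos hneg, PySem.List.pyRange_one_eq_nil hneg]
    rfl
  · have hpos : 0 < steps := by omega
    have hd : device ≠ "" := by
      rcases hPre with h | ⟨h1, h2⟩
      · omega
      · exact h1
    have ht : track ≠ "" := by
      rcases hPre with h | ⟨h1, h2⟩
      · omega
      · exact h2
    have ha := toList_len_ne device hd
    have hb := toList_len_ne track ht
    have hper := delta_per device track
    have hbd := delta_bd device track
    set dl := pvDeltaAt device track with hdl
    set L := Nat.lcm device.toList.length track.toList.length with hLdef
    have hL : L ≠ 0 := Nat.lcm_ne_zero ha hb
    rw [calcA device track ha hb steps]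
    simp only [calc_power_alt]
    rw [if_neg (by omega)]
    rw [pvEuclid_eq track.toList.length device.toList.length]
    rw [show device.toList.length * track.toList.length
          / Nat.gcd device.toList.length track.toList.length = L from rfl]
    rw [sum_list_range dl L, Cfold L dl 0 0]
    simp only [zero_add]
    rw [show steps = ((steps.toNat : Nat) : Int) from (Int.toNat_of_nonneg hpos.le).symm]
    rw [PySem.Int.floordiv_natCast, PySem.Int.mod_natCast]
    simp only [Int.toNat_natCast]
    rw [pvLoop_runN dl L hper hbd (steps.toNat / L) 10 0]
    have hmlt := Nat.mod_lt steps.toNat (Nat.pos_of_ne_zero hL)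
    rw [show ((List.range L).map dl).take (steps.toNat % L)
          = (List.range (steps.toNat % L)).map dl from by
      rw [← List.map_take, List.take_range]
      rw [Nat.min_eq_left hmlt.le]]
    rw [show pvSim (runN dl 0 (steps.toNat / L * L) 10 0).1
            ((List.range (steps.toNat % L)).map dl)
          = runN dl 0 (steps.toNat % L) (runN dl 0 (steps.toNat / L * L) 10 0).1 0 from by
      rw [pvSim, pvSim_eq_runL, runL_range_map0]]
    have hsplit : steps.toNat = steps.toNat / L * L + steps.toNat % L := by
      have h := Nat.div_add_mod steps.toNat L
      rw [Nat.mul_comm] at h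
      omega
    have hA : (runN dl 0 steps.toNat 10 0).2
        = (runN dl 0 (steps.toNat / L * L) 10 0).2
          + (runN dl 0 (steps.toNat % L) (runN dl 0 (steps.toNat / L * L) 10 0).1 0).2 := by
      conv_lhs => rw [hsplit]
      rw [runN_append]
      rw [show (0 : Nat) + steps.toNat / L * L = steps.toNat / L * L from by omega]
      rw [runN_shift_mul dl L hper]
      rw [runN_t dl (steps.toNat % L) 0 (runN dl 0 (steps.toNat / L * L) 10 0).1
          (runN dl 0 (steps.toNat / L * L) 10 0).2]
    rw [hA]
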